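-- pv_equiv track=rewrite | github.com/11hertz/codingTest_Python | 프로그래머스/0/181858. 무작위로 K개의 수 뽑기/무작위로 K개의 수 뽑기.py | solution
-- ===== SOURCE A (Python) =====
-- def solution(arr, k):
--     answer = [-1 for x in range(k)]
--     setArr = []
--
--     for x in arr :
--         if x not in setArr : setArr.append(x)
--
--     setArr = setArr[:k]
--
--     for idx, val in enumerate(setArr):
--         answer[idx] = val
--
--     return answer
-- ===== SOURCE B (Python) =====
-- def solution(arr, k):
--     out = []
--     while len(out) < k and arr:
--         head = arr[0]
--         out.append(head)
--         arr = [x for x in arr[1:] if x != head]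
--     return out + [-1] * (k - len(out))
-- ===== Notes on version B (the rewrite author's own statement) =====
-- stated objective: alternative
-- what changed: Replaces A's two staged passes (grow a uniques list by membership scans, then copy it into a prefilled [-1]*k array by index) with selection-by-elimination: no seen list and no index writes at all - repeatedly take the head of the remaining list, filter every duplicate of it out of the rest, stop after k picks, and pad the result arithmetically with [-1]*(k-len(out)).
import Mathlib
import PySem

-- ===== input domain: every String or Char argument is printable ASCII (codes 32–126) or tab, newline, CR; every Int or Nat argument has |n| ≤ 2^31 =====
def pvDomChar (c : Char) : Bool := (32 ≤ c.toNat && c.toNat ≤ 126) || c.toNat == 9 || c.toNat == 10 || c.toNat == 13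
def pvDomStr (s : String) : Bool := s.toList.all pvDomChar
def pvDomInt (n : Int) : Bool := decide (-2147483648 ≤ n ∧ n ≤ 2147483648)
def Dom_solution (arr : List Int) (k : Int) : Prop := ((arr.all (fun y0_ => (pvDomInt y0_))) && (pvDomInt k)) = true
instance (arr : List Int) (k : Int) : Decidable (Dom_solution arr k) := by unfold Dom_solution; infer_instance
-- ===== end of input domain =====

-- B replaces A's two staged passes (membership-scan uniques list, then indexed copy into a
-- prefilled [-1]*k array) with selection-by-elimination: repeatedly take the head, filter its
-- duplicates out of the rest, stop after k picks, and pad arithmetically.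

-- ===== PORT A =====
def solution (arr : List Int) (k : Int) : List Int :=
  let answer := (PySem.List.pyRange 0 k 1).map (fun _ => (-1 : Int))
  let setArr := arr.foldl (fun s x => if x ∈ s then s else s ++ [x]) ([] : List Int)
  let setArr2 := PySem.List.slice setArr none (some k)
  -- answer[idx] = val : pySetD is exact here since Pre_ keeps idx in range
  (PySem.List.enumerate setArr2 0).foldl (fun a p => PySem.List.pySetD a p.1 p.2) answer

-- ===== PORT B =====
-- the while loop: while len(out) < k and arr: head = arr[0]; out.append(head); arr = [x for x in arr[1:] if x != head]
def solBLoop (k : Int) (out : List Int) (arr : List Int) : List Int :=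
  if h : (out.length : Int) < k ∧ arr ≠ [] then
    let x := arr.head h.2
    solBLoop k (out ++ [x]) (arr.tail.filter (fun y => y != x))
  else out
termination_by arr.length
decreasing_by
  have h1 := List.length_filter_le (fun y => y != arr.head h.2) arr.tail
  have h2 : arr.length ≠ 0 := by simpa [List.length_eq_zero_iff] using h.2
  simp only [List.length_tail] at h1
  omega

def solution_alt (arr : List Int) (k : Int) : List Int :=
  let out := solBLoop k [] arr
  out ++ PySem.List.pyRepeat [(-1 : Int)] (k - out.length)

-- ===== PRECONDITION & SPEC =====
-- Pre_ excludes exactly the inputs on which A raises IndexError: negative k with more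
-- than -k distinct values in arr (answer is [] but the copy loop assigns answer[idx]).
def Pre_solution (arr : List Int) (k : Int) : Prop :=
  0 ≤ k ∨ ((PySem.Set.ofList arr).length : Int) ≤ -k
instance (arr : List Int) (k : Int) : Decidable (Pre_solution arr k) := by unfold Pre_solution; infer_instance

def pvWitness_solution : List Int × Int := ([1, 2, 2, 3], 2)

def Spec_solution (arr : List Int) (k : Int) (out : List Int) : Prop := out = solution_alt arr k
instance (arr : List Int) (k : Int) (out : List Int) : Decidable (Spec_solution arr k out) := by unfold Spec_solution; infer_instance

-- ===== CLAIM (what is proved, stated in full; the proofs are below) =====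
def Claim_equal_solution : Prop := ∀ (arr : List Int) (k : Int), Dom_solution arr k → Pre_solution arr k → Spec_solution arr k (solution arr k)

-- ===== LEMMAS AND PROOFS =====

-- the "new uniques, in order" of a list relative to an already-seen list
def pvRU (seen : List Int) : List Int → List Int
  | [] => []
  | x :: xs => if x ∈ seen then pvRU seen xs else x :: pvRU (seen ++ [x]) xs

theorem pvFoldA (arr : List Int) : ∀ (s : List Int),
    arr.foldl (fun s x => if x ∈ s then s else s ++ [x]) s = s ++ pvRU s arr := by
  induction arr with
  | nil => intro s; simp [pvRU]
  | cons x xs ih =>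
    intro s
    by_cases h : x ∈ s
    · simp [pvRU, h, List.foldl_cons, ih]
    · simp [pvRU, h, List.foldl_cons, ih (s ++ [x])]

theorem pvAddEq : (PySem.Set.add : PySem.Set Int → Int → PySem.Set Int)
    = fun s x => if x ∈ s then s else s ++ [x] := by
  funext s x
  simp [PySem.Set.add]

theorem pvOfListEq (arr : List Int) : PySem.Set.ofList arr = pvRU [] arr := by
  rw [PySem.Set.ofList_eq_foldl, pvAddEq, pvFoldA]
  simp

theorem pvWrite : ∀ (u : List Int) (base : List Int) (s : Nat), s + u.length ≤ base.length →
    (PySem.List.enumerate u (s : Int)).foldl (fun a p => PySem.List.pySetD a p.1 p.2) base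
      = base.take s ++ u ++ base.drop (s + u.length) := by
  intro u
  induction u with
  | nil => intro base s _; simp
  | cons x u ih =>
    intro base s hs
    simp only [List.length_cons] at hs
    have hset : (s : Int) + 1 = ((s + 1 : Nat) : Int) := by push_cast; ring
    rw [PySem.List.enumerate_cons, List.foldl_cons, hset, PySem.List.pySetD_natCast,
        ih (base.set s x) (s + 1) (by simp; omega)]
    have hlt : s < base.length := by omega
    rw [List.set_eq_take_append_cons_drop, if_pos hlt]
    have h1 : (base.take s ++ x :: base.drop (s + 1)).take (s + 1)
        = base.take s ++ [x] := by
      rw [List.take_append]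
      simp [List.length_take, Nat.min_eq_left (le_of_lt hlt)]
    have h2 : (base.take s ++ x :: base.drop (s + 1)).drop (s + 1 + u.length)
        = base.drop (s + (u.length + 1)) := by
      rw [List.drop_append]
      have e1 : (base.take s).drop (s + 1 + u.length) = [] := by
        apply List.drop_eq_nil_of_le
        simp [List.length_take]
        omega
      have e2 : s + 1 + u.length - (base.take s).length = u.length + 1 := by
        simp [List.length_take]
        omega
      rw [e1, e2, List.nil_append, List.drop_succ_cons, List.drop_drop]
      congr 1
      omega
    rw [h1, h2]
    simp

theorem pvAnswerRep (k : Int) :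
    (PySem.List.pyRange 0 k 1).map (fun _ => (-1 : Int)) = List.replicate k.toNat (-1) := by
  rw [PySem.List.pyRange_one]
  simp [Function.comp_def]

-- pvRU only depends on the membership of `seen`
theorem pvRU_congr (xs : List Int) : ∀ (s t : List Int), (∀ a, a ∈ s ↔ a ∈ t) → pvRU s xs = pvRU t xs := by
  induction xs with
  | nil => intro s t _; rfl
  | cons z zs ih =>
    intro s t h
    by_cases hz : z ∈ s
    · simp only [pvRU, if_pos hz, if_pos ((h z).mp hz)]
      exact ih s t h
    · simp only [pvRU, if_neg hz, if_neg (fun c => hz ((h z).mpr c))]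
      congr 1
      exact ih (s ++ [z]) (t ++ [z]) (by intro a; simp [h a])

-- eliminating the head's duplicates = remembering the head as seen
theorem pvFilterSeen (xs : List Int) : ∀ (seen : List Int) (x : Int),
    pvRU (seen ++ [x]) xs = pvRU seen (xs.filter (fun y => y != x)) := by
  induction xs with
  | nil => intro seen x; simp [pvRU]
  | cons y ys ih =>
    intro seen x
    by_cases hyx : y = x
    · subst hyx
      simp [pvRU, ih]
    · by_cases hys : y ∈ seen
      · simp [pvRU, hyx, hys, ih]
      · have hmem : y ∉ seen ++ [x] := by simp [hys, hyx]
        simp only [pvRU, if_neg hmem, List.filter_cons, bne_iff_ne, ne_eq, hyx,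
          not_false_eq_true, if_true, if_neg hys]
        congr 1
        calc pvRU (seen ++ [x] ++ [y]) ys = pvRU (seen ++ [y] ++ [x]) ys := by
              apply pvRU_congr; intro a; simp; tauto
          _ = pvRU (seen ++ [y]) (ys.filter (fun z => z != x)) := ih (seen ++ [y]) x

-- characterisation of B's loop
theorem pvBLoop (k : Int) (out arr : List Int) :
    solBLoop k out arr = out ++ (pvRU [] arr).take (k - out.length).toNat := by
  induction out, arr using solBLoop.induct k with
  | case1 out arr h x ih =>
    obtain ⟨hk, hne⟩ := h
    obtain ⟨x', xs, rfl⟩ := List.exists_cons_of_ne_nil hne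
    rw [solBLoop, dif_pos ⟨hk, hne⟩]
    have hx : x = x' := rfl
    simp only [hx, List.tail_cons] at ih
    show solBLoop k (out ++ [x']) (List.filter (fun y => y != x') (x' :: xs).tail)
        = out ++ List.take (k - (out.length : Int)).toNat (pvRU [] (x' :: xs))
    simp only [List.tail_cons]
    rw [ih]
    have hru : pvRU [] (x' :: xs) = x' :: pvRU [] (xs.filter (fun y => y != x')) := by
      simp only [pvRU, List.not_mem_nil, if_false, List.nil_append]
      rw [show [x'] = ([] : List Int) ++ [x'] by simp, pvFilterSeen]
    rw [hru]
    have hm : (k - (out.length : Int)).toNat = (k - ((out ++ [x']).length : Int)).toNat + 1 := by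
      simp only [List.length_append, List.length_cons, List.length_nil]
      push_cast; omega
    rw [hm, List.take_succ_cons]
    simp
  | case2 out arr h =>
    rw [solBLoop, dif_neg h]
    rcases not_and_or.mp h with hk | hne
    · rw [show (k - (out.length : Int)).toNat = 0 by omega]
      simp
    · have : arr = [] := by simpa using hne
      subst this
      simp [pvRU]

-- ===== VERDICT (by name: the statement is the Claim_ definition above) =====
theorem solution_spec : Claim_equal_solution := by
  intro arr k _hDom hPre
  unfold Spec_solution solution solution_alt
  simp only []
  rw [pvBLoop]
  simp only [List.length_nil, List.nil_append, Int.natCast_zero, Int.sub_zero]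
  set u := pvRU [] arr with hu
  rcases le_or_gt 0 k with hk | hk
  · -- k ≥ 0
    set n : Nat := k.toNat with hn
    have hkn : k = (n : Int) := by omega
    rw [pvAnswerRep, pvFoldA]
    simp only [List.nil_append, ← hu]
    have hslice : PySem.List.slice u none (some k) = u.take n := by
      rw [hkn, PySem.List.slice_to_natCast]
    rw [hslice]
    set t := u.take n with ht
    have htle : t.length ≤ n := by simp [ht]
    have h0 : ((0 : Nat) : Int) = (0 : Int) := rfl
    rw [← h0, pvWrite t (List.replicate n (-1)) 0 (by simp; omega)]
    rw [PySem.List.pyRepeat_singleton]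
    simp only [List.take_zero, List.nil_append, Nat.zero_add, List.drop_replicate]
    congr 1
    congr 1
    omega
  · -- k < 0 : both sides are []
    have hL : ((PySem.Set.ofList arr).length : Int) ≤ -k := by
      rcases hPre with h | h
      · omega
      · exact h
    have hBt : u.take (k.toNat) = [] := by
      simp [show k.toNat = 0 by omega]
    rw [hBt]
    have hBr : PySem.List.pyRepeat [(-1 : Int)] (k - ([] : List Int).length) = [] := by
      rw [PySem.List.pyRepeat_singleton]
      simp only [List.length_nil, Int.natCast_zero, Int.sub_zero]
      rw [show k.toNat = 0 by omega]
      rfl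
    rw [hBr]
    -- A side
    have hansw : (PySem.List.pyRange 0 k 1).map (fun _ => (-1:Int)) = [] := by
      rw [pvAnswerRep]
      simp [show k.toNat = 0 by omega]
    set m : Nat := (-k).toNat with hm
    have hmpos : 0 < m := by omega
    have hkm : k = -(m : Int) := by omega
    have hlen : u.length ≤ m := by
      rw [hu, ← pvOfListEq arr]; omega
    rw [hansw, pvFoldA]
    simp only [List.nil_append, ← hu]
    have hslice : PySem.List.slice u none (some k) = [] := by
      rw [hkm, PySem.List.slice_to_neg_natCast _ m hmpos]
      rw [show u.length - m = 0 by omega, List.take_zero]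
    rw [hslice]
    simp [PySem.List.enumerate]
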